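-- pv_equiv track=rewrite | github.com/lisss/ntbts | no_review/grokking_the_coding_int/sliding_window/__init__.py | length_of_longest_subarray
-- ===== SOURCE A (Python) =====
-- def length_of_longest_subarray(arr, k):
--     window_start, max_length, max_ones_count = 0, 0, 0
--
--     # Try to extend the range [window_start, window_end]
--     for window_end in range(len(arr)):
--         right_char = arr[window_end]
--         if right_char == 1:
--             max_ones_count += 1
--
--         if (window_end - window_start + 1 - max_ones_count) > k:
--             if arr[window_start] == 1:
--                 max_ones_count -= 1
--             window_start += 1
--
--         max_length = max(max_length, window_end - window_start + 1)
--     return max_length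
-- ===== SOURCE B (Python) =====
-- def length_of_longest_subarray(arr, k):
--     # prefix[i] = number of non-one elements among arr[0:i]
--     prefix = [0]
--     for x in arr:
--         prefix.append(prefix[-1] + (0 if x == 1 else 1))
--     best = 0
--     for end in range(len(arr)):
--         # smallest start in [0, end+1] with prefix[end+1] - prefix[start] <= k,
--         # found by binary search over the sorted prefix array
--         target = prefix[end + 1] - k
--         lo, hi = 0, end + 1
--         while lo < hi:
--             mid = (lo + hi) // 2
--             if prefix[mid] < target:
--                 lo = mid + 1
--             else:
--                 hi = mid
--         best = max(best, end - lo + 1)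
--     return best
-- ===== Notes on version B (the rewrite author's own statement) =====
-- stated objective: alternative
-- what changed: Replaces A's online sliding window (one moving start pointer with an incrementally maintained ones-count) by a precomputed prefix array of non-one counts plus, for each end index, a binary search for the minimal feasible window start.
import Mathlib
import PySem

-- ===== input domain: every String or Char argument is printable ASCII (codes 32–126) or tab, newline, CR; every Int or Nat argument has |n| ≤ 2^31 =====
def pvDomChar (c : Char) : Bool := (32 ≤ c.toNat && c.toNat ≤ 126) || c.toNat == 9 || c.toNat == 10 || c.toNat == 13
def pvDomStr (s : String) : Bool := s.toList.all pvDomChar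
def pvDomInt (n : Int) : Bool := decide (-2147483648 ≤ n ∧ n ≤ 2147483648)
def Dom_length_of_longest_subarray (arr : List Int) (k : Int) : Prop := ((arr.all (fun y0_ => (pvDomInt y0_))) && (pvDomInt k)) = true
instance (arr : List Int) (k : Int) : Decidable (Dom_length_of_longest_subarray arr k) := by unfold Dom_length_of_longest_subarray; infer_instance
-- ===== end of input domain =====

-- B replaces A's sliding window by a precomputed prefix array of non-one counts plus a
-- per-end binary search for the minimal window start (objective: alternative algorithm).


-- ===== PORT A =====
def length_of_longest_subarray (arr : List Int) (k : Int) : Int :=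
  let st := (PySem.List.pyRange 0 (PySem.List.len arr) 1).foldl
    (fun (s : Int × Int × Int) windowEnd =>
      let windowStart := s.1
      let maxLength := s.2.1
      let maxOnesCount := s.2.2
      let rightChar := PySem.List.pyGetD arr windowEnd 0
      let maxOnesCount := if rightChar == 1 then maxOnesCount + 1 else maxOnesCount
      let p : Int × Int :=
        if windowEnd - windowStart + 1 - maxOnesCount > k then
          (windowStart + 1,
           if PySem.List.pyGetD arr windowStart 0 == 1 then maxOnesCount - 1 else maxOnesCount)
        else (windowStart, maxOnesCount)
      (p.1, max maxLength (windowEnd - p.1 + 1), p.2))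
    (0, 0, 0)
  st.2.1

-- ===== PORT B =====
-- the 'while lo < hi' binary-search loop of Source B, step for step
def pvBisect (pre : List Int) (target lo hi : Int) : Int :=
  if h : lo < hi then
    let mid := PySem.Int.floordiv (lo + hi) 2
    if PySem.List.pyGetD pre mid 0 < target then pvBisect pre target (mid + 1) hi
    else pvBisect pre target lo mid
  else lo
termination_by (hi - lo).toNat
decreasing_by
  · have h1 := PySem.Int.le_floordiv_iff_mul_le (a := lo + hi) (b := 2) (q := lo) (by omega)
    have h2 := PySem.Int.floordiv_lt_iff_lt_mul (a := lo + hi) (b := 2) (q := hi) (by omega)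
    omega
  · have h1 := PySem.Int.le_floordiv_iff_mul_le (a := lo + hi) (b := 2) (q := lo) (by omega)
    have h2 := PySem.Int.floordiv_lt_iff_lt_mul (a := lo + hi) (b := 2) (q := hi) (by omega)
    omega

def length_of_longest_subarray_alt (arr : List Int) (k : Int) : Int :=
  let pre := arr.foldl
    (fun acc x => acc ++ [PySem.List.pyGetD acc (-1) 0 + (if x == 1 then 0 else 1)]) [0]
  (PySem.List.pyRange 0 (PySem.List.len arr) 1).foldl
    (fun best e =>
      let target := PySem.List.pyGetD pre (e + 1) 0 - k
      let lo := pvBisect pre target 0 (e + 1)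
      max best (e - lo + 1))
    0

-- ===== PRECONDITION & SPEC =====
def Spec_length_of_longest_subarray (arr : List Int) (k : Int) (out : Int) : Prop := out = length_of_longest_subarray_alt arr k
instance (arr : List Int) (k : Int) (out : Int) : Decidable (Spec_length_of_longest_subarray arr k out) := by unfold Spec_length_of_longest_subarray; infer_instance

-- ===== CLAIM (what is proved, stated in full; the proofs are below) =====
def Claim_equal_length_of_longest_subarray : Prop := ∀ (arr : List Int) (k : Int), Dom_length_of_longest_subarray arr k → Spec_length_of_longest_subarray arr k (length_of_longest_subarray arr k)

-- ===== LEMMAS AND PROOFS =====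

-- zpre arr i = number of non-one elements among the first i elements of arr
def zpre (arr : List Int) (i : Nat) : Nat := (arr.take i).countP (fun x => decide (x ≠ 1))

-- A's window start after processing the first m elements
def startF (arr : List Int) (k : Int) : Nat → Nat
  | 0 => 0
  | m + 1 =>
      if ((zpre arr (m + 1) : Int) - (zpre arr (startF arr k m) : Int)) > k
      then startF arr k m + 1 else startF arr k m

-- the feasibility test: window [s, e] contains at most k non-ones
def qB (arr : List Int) (k : Int) (e s : Nat) : Bool :=
  decide ((zpre arr (e + 1) : Int) - k ≤ (zpre arr s : Int))

-- least s < e+1 with zpre (e+1) - zpre s ≤ k, else e+1 (what B's binary search finds)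
def sMin (arr : List Int) (k : Int) (e : Nat) : Nat :=
  (List.range (e + 1)).findIdx (qB arr k e)

-- the best feasible window length ending at index e (0 when none)
def cand (arr : List Int) (k : Int) (e : Nat) : Int :=
  (e : Int) - (sMin arr k e : Int) + 1

-- running maximum of cand over e < m (B's accumulator)
def maxcF (arr : List Int) (k : Int) : Nat → Int
  | 0 => 0
  | m + 1 => max (maxcF arr k m) (cand arr k m)


-- number of ones in arr[s:m]
def onesSeg (arr : List Int) (s m : Nat) : Nat :=
  ((arr.take m).drop s).countP (fun x => decide (x = 1))

-- number of non-ones in arr[s:m]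
def zSeg (arr : List Int) (s m : Nat) : Nat :=
  ((arr.take m).drop s).countP (fun x => decide (x ≠ 1))

lemma zpre_zero (arr : List Int) : zpre arr 0 = 0 := by simp [zpre]

lemma zpre_mono (arr : List Int) {i j : Nat} (h : i ≤ j) : zpre arr i ≤ zpre arr j := by
  unfold zpre
  exact List.Sublist.countP_le (by
    have : arr.take i = (arr.take j).take i := by simp [List.take_take, h]
    rw [this]; exact (List.take_prefix _ _).sublist)

lemma take_add_one_eq (arr : List Int) {m : Nat} (h : m < arr.length) :
    arr.take (m + 1) = arr.take m ++ [arr[m]] := by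
  rw [List.take_add_one, List.getElem?_eq_getElem h]; rfl

lemma zpre_split (arr : List Int) {s m : Nat} (h : s ≤ m) :
    zpre arr s + zSeg arr s m = zpre arr m := by
  unfold zpre zSeg
  conv_rhs => rw [← List.take_append_drop s (arr.take m)]
  rw [List.countP_append, List.take_take, Nat.min_eq_left h]

lemma seg_len (arr : List Int) {s m : Nat} (hs : s ≤ m) (hm : m ≤ arr.length) :
    onesSeg arr s m + zSeg arr s m = m - s := by
  unfold onesSeg zSeg
  have hlen : ((arr.take m).drop s).length = m - s := by
    simp [List.length_drop, List.length_take, Nat.min_eq_left hm]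
  have := List.length_eq_countP_add_countP (fun x => decide (x = 1)) (l := (arr.take m).drop s)
  rw [hlen] at this
  rw [this]
  congr 1
  apply List.countP_congr
  intro x _
  by_cases h1 : x = 1 <;> simp [h1]

lemma onesSeg_drop_front (arr : List Int) {s m : Nat} (hs : s < m) (hm : m ≤ arr.length) :
    onesSeg arr s m = (if arr[s]'(by omega) = 1 then 1 else 0) + onesSeg arr (s + 1) m := by
  unfold onesSeg
  have hlt : s < (arr.take m).length := by simp [List.length_take]; omega
  rw [List.drop_eq_getElem_cons hlt, List.countP_cons]
  have : (arr.take m)[s] = arr[s]'(by omega) := List.getElem_take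
  rw [this]
  by_cases h1 : arr[s]'(by omega) = 1 <;> simp [h1] <;> omega

lemma onesSeg_extend (arr : List Int) {s m : Nat} (hs : s ≤ m) (hm : m < arr.length) :
    onesSeg arr s (m + 1) = onesSeg arr s m + (if arr[m] = 1 then 1 else 0) := by
  unfold onesSeg
  rw [take_add_one_eq arr hm]
  rw [List.drop_append_of_le_length (by simp [List.length_take]; omega)]
  rw [List.countP_append]
  by_cases h1 : arr[m] = 1 <;> simp [h1]

lemma startF_le (arr : List Int) (k : Int) (m : Nat) : startF arr k m ≤ m := by
  induction m with
  | zero => simp [startF]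
  | succ m ih => unfold startF; split <;> omega

lemma startF_succ (arr : List Int) (k : Int) (m : Nat) :
    startF arr k (m + 1) =
      if ((zpre arr (m + 1) : Int) - (zpre arr (startF arr k m) : Int)) > k
      then startF arr k m + 1 else startF arr k m := rfl

lemma qB_mono (arr : List Int) (k : Int) (e : Nat) {s s' : Nat} (h : s ≤ s')
    (hq : qB arr k e s = true) : qB arr k e s' = true := by
  simp only [qB, decide_eq_true_eq] at *
  have := zpre_mono arr h
  omega

lemma qB_anti (arr : List Int) (k : Int) (e s : Nat)
    (hq : qB arr k (e + 1) s = true) : qB arr k e s = true := by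
  simp only [qB, decide_eq_true_eq] at *
  have := zpre_mono arr (show e + 1 ≤ e + 1 + 1 by omega)
  omega

lemma sMin_le (arr : List Int) (k : Int) (e : Nat) : sMin arr k e ≤ e + 1 := by
  have := List.findIdx_le_length (p := qB arr k e) (xs := List.range (e + 1))
  simpa using this

lemma sMin_sat (arr : List Int) (k : Int) (e : Nat) (h : sMin arr k e < e + 1) :
    qB arr k e (sMin arr k e) = true := by
  have hlt : (List.range (e + 1)).findIdx (qB arr k e) < (List.range (e + 1)).length := by
    simpa using h
  have := List.findIdx_getElem (w := hlt)
  rwa [List.getElem_range] at this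

lemma sMin_not (arr : List Int) (k : Int) (e : Nat) {i : Nat} (h : i < sMin arr k e) :
    qB arr k e i = false := by
  have := List.not_of_lt_findIdx (p := qB arr k e) (xs := List.range (e + 1)) (i := i) h
  rwa [List.getElem_range] at this

lemma sMin_min (arr : List Int) (k : Int) (e : Nat) {j : Nat} (hj : j ≤ e)
    (hq : qB arr k e j = true) : sMin arr k e ≤ j := by
  by_contra hc
  have := sMin_not arr k e (i := j) (by omega)
  simp [this] at hq

-- A's window start never passes B's minimal feasible start
lemma startF_le_sMin (arr : List Int) (k : Int) (m : Nat) :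
    startF arr k (m + 1) ≤ sMin arr k m := by
  induction m with
  | zero =>
    have h0 : startF arr k 0 = 0 := rfl
    have hz := zpre_zero arr
    rw [startF_succ]
    split
    · rename_i hgt
      by_contra hc
      have h1 : sMin arr k 0 = 0 := by omega
      have := sMin_sat arr k 0 (by omega)
      rw [h1] at this
      simp only [qB, decide_eq_true_eq] at this
      rw [h0] at hgt
      omega
    · omega
  | succ m ih =>
    by_cases hbig : sMin arr k (m + 1) = m + 2
    · have := startF_le arr k (m + 1 + 1)
      omega
    · have hlt : sMin arr k (m + 1) < m + 2 := by have := sMin_le arr k (m + 1); omega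
      have hsat : qB arr k (m + 1) (sMin arr k (m + 1)) = true := sMin_sat arr k (m + 1) hlt
      -- sMin m ≤ sMin (m+1)
      have hmono : sMin arr k m ≤ sMin arr k (m + 1) := by
        by_cases hcase : sMin arr k (m + 1) = m + 1
        · have := sMin_le arr k m; omega
        · exact sMin_min arr k m (by omega) (qB_anti arr k m _ hsat)
      rw [startF_succ]
      split
      · rename_i hgt
        -- shrink: the old start is infeasible for window ending at m+1
        have hinfeas : qB arr k (m + 1) (startF arr k (m + 1)) = false := by
          simp only [qB, decide_eq_false_iff_not, not_le]
          omega
        have hlt2 : startF arr k (m + 1) < sMin arr k (m + 1) := by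
          by_contra hc
          have := qB_mono arr k (m + 1) (show sMin arr k (m+1) ≤ startF arr k (m+1) by omega) hsat
          simp [this] at hinfeas
        omega
      · omega

-- B's candidate never beats A's window length
lemma cand_le (arr : List Int) (k : Int) (m : Nat) :
    cand arr k m ≤ ((m : Int) + 1) - (startF arr k (m + 1) : Int) := by
  have := startF_le_sMin arr k m
  simp only [cand]
  omega

-- when A does not shrink, B's minimal start is at least as good as A's
lemma sMin_le_startF_of_noshrink (arr : List Int) (k : Int) (m : Nat)
    (h : ¬ ((zpre arr (m + 1) : Int) - (zpre arr (startF arr k m) : Int)) > k) :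
    sMin arr k m ≤ startF arr k m := by
  apply sMin_min arr k m (startF_le arr k m)
  simp only [qB, decide_eq_true_eq]
  omega

-- the core identity: B's running maximum equals A's window length
lemma maxcF_eq (arr : List Int) (k : Int) (m : Nat) :
    maxcF arr k m = (m : Int) - (startF arr k m : Int) := by
  induction m with
  | zero => simp [maxcF, startF]
  | succ m ih =>
    have hcle := cand_le arr k m
    show max (maxcF arr k m) (cand arr k m) = _
    rw [ih, startF_succ]
    split
    · rename_i hgt
      rw [startF_succ, if_pos hgt] at hcle
      have : cand arr k m ≤ (m : Int) - (startF arr k m : Int) := by push_cast at hcle ⊢; omega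
      omega
    · rename_i hngt
      have hge : sMin arr k m ≤ startF arr k m := sMin_le_startF_of_noshrink arr k m hngt
      rw [startF_succ, if_neg hngt] at hcle
      simp only [cand] at *
      omega


-- A's loop body, named for the proofs (syntactically identical to the lambda in the port)
def stepA (arr : List Int) (k : Int) (s : Int × Int × Int) (windowEnd : Int) : Int × Int × Int :=
  let windowStart := s.1
  let maxLength := s.2.1
  let maxOnesCount := s.2.2
  let rightChar := PySem.List.pyGetD arr windowEnd 0
  let maxOnesCount := if rightChar == 1 then maxOnesCount + 1 else maxOnesCount
  let p : Int × Int :=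
    if windowEnd - windowStart + 1 - maxOnesCount > k then
      (windowStart + 1,
       if PySem.List.pyGetD arr windowStart 0 == 1 then maxOnesCount - 1 else maxOnesCount)
    else (windowStart, maxOnesCount)
  (p.1, max maxLength (windowEnd - p.1 + 1), p.2)

lemma portA_eq_fold (arr : List Int) (k : Int) :
    length_of_longest_subarray arr k
      = ((PySem.List.pyRange 0 (PySem.List.len arr) 1).foldl (stepA arr k) (0, 0, 0)).2.1 := rfl

lemma stepA_spec (arr : List Int) (k : Int) (m : Nat) (hm : m < arr.length) :
    stepA arr k ((startF arr k m : Int), (m : Int) - (startF arr k m : Int),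
        (onesSeg arr (startF arr k m) m : Int)) (m : Int)
      = ((startF arr k (m + 1) : Int), ((m + 1 : Nat) : Int) - (startF arr k (m + 1) : Int),
        (onesSeg arr (startF arr k (m + 1)) (m + 1) : Int)) := by
  have hsle : startF arr k m ≤ m := startF_le arr k m
  have hget : PySem.List.pyGetD arr (m : Int) 0 = arr[m] := by
    rw [PySem.List.pyGetD_natCast, List.getD_eq_getElem arr 0 hm]
  have hgetS : PySem.List.pyGetD arr (startF arr k m : Int) 0 = arr[startF arr k m]'(by omega) := by
    rw [PySem.List.pyGetD_natCast, List.getD_eq_getElem arr 0 (by omega)]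
  have hext := onesSeg_extend arr hsle hm
  have hsplit := zpre_split arr (show startF arr k m ≤ m + 1 by omega)
  have hseg := seg_len arr (show startF arr k m ≤ m + 1 by omega) (show m + 1 ≤ arr.length by omega)
  simp only [stepA, hget, hgetS, beq_iff_eq]
  have hoc1 : (if arr[m] = 1 then ((onesSeg arr (startF arr k m) m : Int)) + 1
      else (onesSeg arr (startF arr k m) m : Int)) = (onesSeg arr (startF arr k m) (m + 1) : Int) := by
    by_cases h1 : arr[m] = 1 <;> simp [h1] at hext ⊢ <;> omega
  rw [hoc1]
  have hcond : ((m : Int) - (startF arr k m : Int) + 1 - (onesSeg arr (startF arr k m) (m + 1) : Int) > k)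
      ↔ ((zpre arr (m + 1) : Int) - (zpre arr (startF arr k m) : Int) > k) := by
    constructor <;> intro h <;> omega
  rw [startF_succ]
  by_cases hC : ((zpre arr (m + 1) : Int) - (zpre arr (startF arr k m) : Int)) > k
  · rw [if_pos (hcond.mpr hC), if_pos hC]
    have hfront := onesSeg_drop_front arr (show startF arr k m < m + 1 by omega)
      (show m + 1 ≤ arr.length by omega)
    simp only [Prod.mk.injEq]
    refine ⟨by push_cast; ring, by push_cast; omega, ?_⟩
    by_cases h1 : arr[startF arr k m]'(by omega) = 1 <;> simp [h1] at hfront ⊢ <;> omega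
  · rw [if_neg (fun h => hC (hcond.mp h)), if_neg hC]
    simp only [Prod.mk.injEq]
    exact ⟨trivial, by push_cast; omega, trivial⟩

lemma foldA_spec (arr : List Int) (k : Int) (m : Nat) (hm : m ≤ arr.length) :
    (PySem.List.pyRange 0 (m : Int) 1).foldl (stepA arr k) (0, 0, 0)
      = ((startF arr k m : Int), (m : Int) - (startF arr k m : Int),
         (onesSeg arr (startF arr k m) m : Int)) := by
  induction m with
  | zero => simp [PySem.List.pyRange_one_eq_nil (by omega : (0:Int) ≤ 0), startF, onesSeg]
  | succ m ih =>
    have hcast : ((m + 1 : Nat) : Int) = (m : Int) + 1 := by push_cast; ring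
    rw [hcast, PySem.List.pyRange_one_succ_right (by positivity), List.foldl_append]
    rw [ih (by omega)]
    simp only [List.foldl_cons, List.foldl_nil]
    rw [stepA_spec arr k m (by omega), hcast]

lemma portA_closed (arr : List Int) (k : Int) :
    length_of_longest_subarray arr k
      = (arr.length : Int) - (startF arr k arr.length : Int) := by
  rw [portA_eq_fold, PySem.List.len_eq, foldA_spec arr k arr.length (le_refl _)]


-- ---- B side ----

-- the fully built prefix list of B
def preL (arr : List Int) : List Int :=
  (List.range (arr.length + 1)).map (fun i => (zpre arr i : Int))

lemma zpre_cons (x : Int) (t : List Int) (j : Nat) :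
    zpre (x :: t) (j + 1) = (if x = 1 then 0 else 1) + zpre t j := by
  simp only [zpre, List.take_succ_cons, List.countP_cons]
  by_cases h1 : x = 1 <;> simp [h1] <;> omega

lemma pre_fold (l : List Int) : ∀ (acc : List Int) (last : Int),
    acc.getLast? = some last →
    l.foldl (fun acc x => acc ++ [PySem.List.pyGetD acc (-1) 0 + (if x == 1 then 0 else 1)]) acc
      = acc ++ (List.range l.length).map (fun i => last + (zpre l (i + 1) : Int)) := by
  induction l with
  | nil => intro acc last _; simp
  | cons x t ih =>
    intro acc last hlast
    have hne : acc ≠ [] := by intro h; rw [h] at hlast; simp at hlast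
    have hget : PySem.List.pyGetD acc (-1) 0 = last := by
      rw [PySem.List.pyGetD_neg_one acc 0 hne]
      have := List.getLast?_eq_some_getLast (l := acc) hne
      rw [this] at hlast
      exact Option.some_inj.mp hlast
    simp only [List.foldl_cons, hget]
    rw [ih (acc ++ [last + (if x == 1 then 0 else 1)]) (last + (if x == 1 then 0 else 1))
        List.getLast?_concat]
    rw [List.append_assoc]
    congr 1
    rw [List.length_cons, List.range_succ_eq_map, List.map_cons, List.map_map]
    have h0 : zpre (x :: t) 1 = (if x = 1 then 0 else 1) := by
      have := zpre_cons x t 0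
      simpa [zpre] using this
    simp only [List.singleton_append, h0]
    congr 1
    · by_cases h1 : x = 1 <;> simp [h1]
    · apply List.map_congr_left
      intro i _
      simp only [Function.comp_apply, Nat.succ_eq_add_one]
      rw [zpre_cons x t (i + 1)]
      by_cases h1 : x = 1 <;> simp [h1] <;> push_cast <;> ring

lemma preL_eq (arr : List Int) :
    arr.foldl (fun acc x => acc ++ [PySem.List.pyGetD acc (-1) 0 + (if x == 1 then 0 else 1)]) [0]
      = preL arr := by
  rw [pre_fold arr [0] 0 rfl]
  unfold preL
  rw [List.range_succ_eq_map, List.map_cons, List.map_map]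
  simp [zpre_zero]

lemma preL_get (arr : List Int) {j : Nat} (hj : j ≤ arr.length) :
    PySem.List.pyGetD (preL arr) (j : Int) 0 = (zpre arr j : Int) := by
  rw [PySem.List.pyGetD_natCast]
  unfold preL
  rw [List.getD_eq_getElem _ 0 (by simp; omega)]
  simp

lemma pvBisect_step (pre : List Int) (target lo hi : Int) (h : lo < hi) :
    pvBisect pre target lo hi =
      (if PySem.List.pyGetD pre (PySem.Int.floordiv (lo + hi) 2) 0 < target
       then pvBisect pre target (PySem.Int.floordiv (lo + hi) 2 + 1) hi
       else pvBisect pre target lo (PySem.Int.floordiv (lo + hi) 2)) := by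
  rw [pvBisect, dif_pos h]

lemma pvBisect_stop (pre : List Int) (target lo hi : Int) (h : ¬ lo < hi) :
    pvBisect pre target lo hi = lo := by
  rw [pvBisect, dif_neg h]

lemma bisect_spec (arr : List Int) (k : Int) (e : Nat) (he : e < arr.length) :
    ∀ (d lo hi : Nat), hi - lo ≤ d → lo ≤ hi → hi ≤ e + 1 →
    lo ≤ sMin arr k e → sMin arr k e ≤ hi →
    pvBisect (preL arr) ((zpre arr (e + 1) : Int) - k) (lo : Int) (hi : Int)
      = (sMin arr k e : Int) := by
  intro d
  induction d with
  | zero =>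
    intro lo hi hd hlh _ hlo hhi
    rw [pvBisect_stop _ _ _ _ (by omega)]
    have : lo = sMin arr k e := by omega
    rw [this]
  | succ d ih =>
    intro lo hi hd hlh hhe hlo hhi
    by_cases hlt : lo < hi
    · rw [pvBisect_step _ _ _ _ (by exact_mod_cast hlt)]
      have hmid : PySem.Int.floordiv ((lo : Int) + (hi : Int)) 2 = (((lo + hi) / 2 : Nat) : Int) := by
        exact_mod_cast PySem.Int.floordiv_natCast (lo + hi) 2
      rw [hmid]
      have hmlo : lo ≤ (lo + hi) / 2 := by omega
      have hmhi : (lo + hi) / 2 < hi := by omega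
      rw [preL_get arr (show (lo + hi) / 2 ≤ arr.length by omega)]
      by_cases hc : (zpre arr ((lo + hi) / 2) : Int) < (zpre arr (e + 1) : Int) - k
      · rw [if_pos hc]
        have hgt : (lo + hi) / 2 + 1 ≤ sMin arr k e := by
          by_contra hcon
          have hsl : sMin arr k e < e + 1 := by omega
          have hsat := sMin_sat arr k e hsl
          have := qB_mono arr k e (show sMin arr k e ≤ (lo + hi) / 2 by omega) hsat
          simp only [qB, decide_eq_true_eq] at this
          omega
        have hcast : (((lo + hi) / 2 : Nat) : Int) + 1 = (((lo + hi) / 2 + 1 : Nat) : Int) := by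
          push_cast; ring
        rw [hcast]
        exact ih ((lo + hi) / 2 + 1) hi (by omega) (by omega) hhe (by omega) hhi
      · rw [if_neg hc]
        have hle : sMin arr k e ≤ (lo + hi) / 2 := by
          apply sMin_min arr k e (by omega)
          simp only [qB, decide_eq_true_eq]
          omega
        exact ih lo ((lo + hi) / 2) (by omega) (by omega) (by omega) hlo hle
    · rw [pvBisect_stop _ _ _ _ (by exact_mod_cast hlt)]
      have : lo = sMin arr k e := by omega
      rw [this]

lemma portB_closed (arr : List Int) (k : Int) :
    length_of_longest_subarray_alt arr k = maxcF arr k arr.length := by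
  show (PySem.List.pyRange 0 (PySem.List.len arr) 1).foldl
      (fun best e =>
        let target := PySem.List.pyGetD
          (arr.foldl (fun acc x => acc ++ [PySem.List.pyGetD acc (-1) 0 + (if x == 1 then 0 else 1)]) [0])
          (e + 1) 0 - k
        let lo := pvBisect
          (arr.foldl (fun acc x => acc ++ [PySem.List.pyGetD acc (-1) 0 + (if x == 1 then 0 else 1)]) [0])
          target 0 (e + 1)
        max best (e - lo + 1)) 0 = maxcF arr k arr.length
  rw [PySem.List.len_eq]
  simp only [preL_eq]
  suffices h : ∀ m : Nat, m ≤ arr.length →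
      (PySem.List.pyRange 0 (m : Int) 1).foldl
        (fun best e =>
          let target := PySem.List.pyGetD (preL arr) (e + 1) 0 - k
          let lo := pvBisect (preL arr) target 0 (e + 1)
          max best (e - lo + 1)) 0 = maxcF arr k m by
    exact h arr.length (le_refl _)
  intro m
  induction m with
  | zero =>
    intro _
    simp [PySem.List.pyRange_one_eq_nil (by omega : (0:Int) ≤ 0), maxcF]
  | succ m ih =>
    intro hm
    have hcast : ((m + 1 : Nat) : Int) = (m : Int) + 1 := by push_cast; ring
    rw [hcast, PySem.List.pyRange_one_succ_right (by positivity), List.foldl_append]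
    rw [ih (by omega)]
    simp only [List.foldl_cons, List.foldl_nil]
    rw [show (m : Int) + 1 = ((m + 1 : Nat) : Int) from hcast.symm]
    rw [preL_get arr (show m + 1 ≤ arr.length by omega)]
    rw [show (0 : Int) = ((0 : Nat) : Int) from rfl]
    rw [bisect_spec arr k m (by omega) (m + 1) 0 (m + 1) (by omega) (by omega) (by omega)
        (by omega) (sMin_le arr k m)]
    show max (maxcF arr k m) ((m : Int) - (sMin arr k m : Int) + 1) = maxcF arr k (m + 1)
    rfl

theorem length_of_longest_subarray_spec : Claim_equal_length_of_longest_subarray := by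
  intro arr k _
  unfold Spec_length_of_longest_subarray
  rw [portA_closed, portB_closed, maxcF_eq]
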